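-- pv_equiv track=rewrite | github.com/chw2006/leetcode | Backtracking/2060_check_if_an_original_string_exists_given_2_encoded_strings.py | possiblyEquals
-- ===== SOURCE A (Python) =====
-- def possiblyEquals(s1: str, s2: str) -> bool:
--     n = len(s1)
--     m = len(s2)
--     cache = {}
--
--     def dfs(i, j, d):
--         # Base case
--         if i == n and j == m:
--             if d == 0:
--                 return True
--             else:
--                 return False
--         # Memoization
--         if (i, j, d) in cache:
--             return cache[(i, j, d)]
--         # Case of digits for s1
--         if i < n and s1[i].isdigit():
--             k = i
--             num = 0
--             # Go until we do not hit a digit. Then for every possible number, call DFS to see if that is possible.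
--             while k < n and s1[k].isdigit():
--                 num = (num * 10) + int(s1[k])
--                 k += 1
--                 # Do a recursive call on this num, do d - num so we can tell which string ptr to increment later
--                 if dfs(k, j, d - num):
--                     return True
--         # Case of digits for s2
--         elif j < m and s2[j].isdigit():
--             k = j
--             num = 0
--             # Go until we do not hit a digit. Then for every possible number, call DFS to see if that is possible.
--             while k < m and s2[k].isdigit():
--                 num = (num * 10) + int(s2[k])
--                 k += 1
--                 # Do d + num, so it's the opposite of what's there for s1
--                 if dfs(i, k, d + num):
--                     return True
--         # Case where diff is 0 and they are alpha
--         elif d == 0: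
--             # If they are equal and alpha, then move to next chars
--             if i < n and j < m and s1[i] == s2[j]:
--                 return dfs(i + 1, j + 1, d)
--         # Case where they are alpha and the diff is less than 0
--         elif d < 0:
--             # If diff is less than 0, that means that s1 is ahead of s2. So we need to increment s2 and diff.
--             if j < m:
--                 return dfs(i, j + 1, d + 1)
--         elif d > 0:
--             # If diff is larger than 0, that means s2 is ahead of s1. Increment s1 and decrement diff
--             if i < n:
--                 return dfs(i + 1, j, d - 1)
--
--         # If we get here, then we can cache that for this tuple, the strings are not equal.
--         cache[(i, j, d)] = False
--         return False
--
--     return dfs(0, 0, 0)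
-- ===== SOURCE B (Python) =====
-- def possiblyEquals(s1: str, s2: str) -> bool:
--     # Forward layered dynamic programming: reach maps a cell (i, j) to the set
--     # of diffs d such that state (i, j, d) is reachable from (0, 0, 0); buckets
--     # queues each populated cell under its layer i + j.  Every edge strictly
--     # increases i + j, so processing buckets in layer order visits each cell
--     # only after its diff-set is complete.  (Cells reachable from (0, 0) always
--     # satisfy i <= len(s1) and j <= len(s2), so the bucket index is in range.)
--     n, m = len(s1), len(s2)
--     reach = {}
--     buckets = [[] for _ in range(n + m + 1)]
--
--     def push(cell, x):
--         s = reach.get(cell)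
--         if s is None:
--             s = set()
--             reach[cell] = s
--             buckets[cell[0] + cell[1]].append(cell)
--         s.add(x)
--
--     push((0, 0), 0)
--     for L in range(n + m + 1):
--         for (i, j) in buckets[L]:
--             for d in reach[(i, j)]:
--                 if i < n and s1[i].isdigit():
--                     num, k = 0, i
--                     while k < n and s1[k].isdigit():
--                         num = num * 10 + int(s1[k])
--                         k += 1
--                         push((k, j), d - num)
--                 elif j < m and s2[j].isdigit():
--                     num, k = 0, j
--                     while k < m and s2[k].isdigit():
--                         num = num * 10 + int(s2[k])
--                         k += 1
--                         push((i, k), d + num)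
--                 elif d == 0:
--                     if i < n and j < m and s1[i] == s2[j]:
--                         push((i + 1, j + 1), 0)
--                 elif d < 0:
--                     if j < m:
--                         push((i, j + 1), d + 1)
--                 else:
--                     if i < n:
--                         push((i + 1, j), d - 1)
--     return 0 in reach.get((n, m), set())
-- ===== Notes on version B (the rewrite author's own statement) =====
-- stated objective: alternative
-- what changed: A's top-down recursive DFS with a memo dict (caching failed states) is replaced by a bottom-up forward dynamic program: a dict maps each cell (i,j) to the set of diffs d reachable from (0,0,0), populated cells are queued in per-layer buckets and processed in increasing i+j (every edge strictly increases i+j), answering whether diff 0 reaches the final cell.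
import Mathlib
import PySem

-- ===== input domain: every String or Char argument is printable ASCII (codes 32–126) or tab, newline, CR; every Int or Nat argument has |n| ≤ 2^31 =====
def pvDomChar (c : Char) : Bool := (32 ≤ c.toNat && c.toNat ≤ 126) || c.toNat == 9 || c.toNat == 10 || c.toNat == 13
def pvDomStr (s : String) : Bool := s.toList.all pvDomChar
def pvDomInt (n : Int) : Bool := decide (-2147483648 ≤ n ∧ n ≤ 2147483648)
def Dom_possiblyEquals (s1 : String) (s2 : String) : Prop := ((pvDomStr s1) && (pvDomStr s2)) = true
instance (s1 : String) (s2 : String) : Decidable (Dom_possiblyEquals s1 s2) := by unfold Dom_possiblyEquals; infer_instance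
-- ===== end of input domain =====

-- B replaces A's top-down memoized recursion by a bottom-up forward dynamic
-- program over a dict mapping each cell (i, j) to the set of reachable diffs,
-- filled layer by layer in increasing i + j; objective: alternative algorithm.

-- ===== PORT A =====
-- Literal transliteration of A: dfs(i, j, d) with a memo dict (stores only False),
-- the two digit-accumulation while-loops become pvLoopA1/pvLoopA2, threading the cache.

mutual
def pvDfsA (c1 c2 : List Char) (i j : Nat) (d : Int)
    (cache : PySem.Dict (Nat × Nat × Int) Bool) :
    Bool × PySem.Dict (Nat × Nat × Int) Bool :=
  if i = c1.length ∧ j = c2.length then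
    (d == 0, cache)
  else
    match cache.get? (i, j, d) with
    | some v => (v, cache)
    | none =>
      if h1 : i < c1.length ∧ (c1.getD i ' ').isDigit then
        match pvLoopA1 c1 c2 j d i 0 cache with
        | (true, c') => (true, c')
        | (false, c') => (false, c'.insert (i, j, d) false)
      else if h2 : j < c2.length ∧ (c2.getD j ' ').isDigit then
        match pvLoopA2 c1 c2 i d j 0 cache with
        | (true, c') => (true, c')
        | (false, c') => (false, c'.insert (i, j, d) false)
      else if d = 0 then
        if h3 : i < c1.length ∧ j < c2.length ∧ c1.getD i ' ' = c2.getD j ' ' then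
          pvDfsA c1 c2 (i+1) (j+1) d cache
        else (false, cache.insert (i, j, d) false)
      else if d < 0 then
        if h4 : j < c2.length then
          pvDfsA c1 c2 i (j+1) (d+1) cache
        else (false, cache.insert (i, j, d) false)
      else if 0 < d then
        if h5 : i < c1.length then
          pvDfsA c1 c2 (i+1) j (d-1) cache
        else (false, cache.insert (i, j, d) false)
      else (false, cache.insert (i, j, d) false)
termination_by 2 * ((c1.length - i) + (c2.length - j)) + 1
decreasing_by all_goals omega

def pvLoopA1 (c1 c2 : List Char) (j : Nat) (d : Int) (k : Nat) (num : Int)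
    (cache : PySem.Dict (Nat × Nat × Int) Bool) :
    Bool × PySem.Dict (Nat × Nat × Int) Bool :=
  if h : k < c1.length ∧ (c1.getD k ' ').isDigit then
    let num' := num * 10 + (((c1.getD k ' ').toNat : Int) - 48)
    match pvDfsA c1 c2 (k+1) j (d - num') cache with
    | (true, c') => (true, c')
    | (false, c') => pvLoopA1 c1 c2 j d (k+1) num' c'
  else (false, cache)
termination_by 2 * ((c1.length - k) + (c2.length - j))
decreasing_by all_goals omega

def pvLoopA2 (c1 c2 : List Char) (i : Nat) (d : Int) (k : Nat) (num : Int)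
    (cache : PySem.Dict (Nat × Nat × Int) Bool) :
    Bool × PySem.Dict (Nat × Nat × Int) Bool :=
  if h : k < c2.length ∧ (c2.getD k ' ').isDigit then
    let num' := num * 10 + (((c2.getD k ' ').toNat : Int) - 48)
    match pvDfsA c1 c2 i (k+1) (d + num') cache with
    | (true, c') => (true, c')
    | (false, c') => pvLoopA2 c1 c2 i d (k+1) num' c'
  else (false, cache)
termination_by 2 * ((c1.length - i) + (c2.length - k))
decreasing_by all_goals omega
end

def possiblyEquals (s1 : String) (s2 : String) : Bool :=
  (pvDfsA s1.toList s2.toList 0 0 0 PySem.Dict.empty).1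

-- ===== PORT B =====
-- Literal transliteration of B (Source B): the state is the pair (reach, buckets);
-- push is pvPush (a fresh cell is also queued in its layer bucket — the index is
-- always in range on cells the program creates, where List.set is exact), the two
-- digit while-loops are pvDig1/pvDig2, the per-diff body is pvBody, the loop over
-- a cell's diff-set is pvCell, and the layer loop is a fold over range.

abbrev pvSt := PySem.Dict (Nat × Nat) (PySem.Set Int) × List (List (Nat × Nat))

def pvPush (st : pvSt) (cell : Nat × Nat) (x : Int) : pvSt :=
  match st.1.get? cell with
  | some s => (st.1.insert cell (PySem.Set.add s x), st.2)
  | none =>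
      (st.1.insert cell (PySem.Set.add [] x),
       st.2.set (cell.1 + cell.2) (st.2.getD (cell.1 + cell.2) [] ++ [cell]))

def pvDig1 (t1 : List Char) (j : Nat) (d : Int) (q : Nat) (acc : Int)
    (st : pvSt) : pvSt :=
  if q < t1.length && PySem.Chars.isdigit (t1.getD q ' ') then
    let acc' := acc * 10 + (((t1.getD q ' ').toNat : Int) - 48)
    pvDig1 t1 j d (q + 1) acc' (pvPush st (q + 1, j) (d - acc'))
  else st
termination_by t1.length - q
decreasing_by simp_all; omega

def pvDig2 (t2 : List Char) (i : Nat) (d : Int) (q : Nat) (acc : Int)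
    (st : pvSt) : pvSt :=
  if q < t2.length && PySem.Chars.isdigit (t2.getD q ' ') then
    let acc' := acc * 10 + (((t2.getD q ' ').toNat : Int) - 48)
    pvDig2 t2 i d (q + 1) acc' (pvPush st (i, q + 1) (d + acc'))
  else st
termination_by t2.length - q
decreasing_by simp_all; omega

def pvBody (t1 t2 : List Char) (i j : Nat) (st : pvSt) (d : Int) : pvSt :=
  if i < t1.length && PySem.Chars.isdigit (t1.getD i ' ') then
    pvDig1 t1 j d i 0 st
  else if j < t2.length && PySem.Chars.isdigit (t2.getD j ' ') then
    pvDig2 t2 i d j 0 st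
  else if d == 0 then
    if i < t1.length && j < t2.length && (t1.getD i ' ' == t2.getD j ' ') then
      pvPush st (i + 1, j + 1) 0
    else st
  else if d < 0 then
    if j < t2.length then pvPush st (i, j + 1) (d + 1) else st
  else
    if i < t1.length then pvPush st (i + 1, j) (d - 1) else st

def pvCell (t1 t2 : List Char) (st : pvSt) (cell : Nat × Nat) : pvSt :=
  (st.1.getD cell []).foldl (pvBody t1 t2 cell.1 cell.2) st

def possiblyEquals_alt (s1 : String) (s2 : String) : Bool :=
  let t1 := s1.toList
  let t2 := s2.toList
  let st0 : pvSt :=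
    pvPush (PySem.Dict.empty, List.replicate (t1.length + t2.length + 1) []) (0, 0) 0
  let fin := (List.range (t1.length + t2.length + 1)).foldl
    (fun st L => (st.2.getD L []).foldl (pvCell t1 t2) st) st0
  PySem.Set.contains (fin.1.getD (t1.length, t2.length) []) 0

-- ===== PRECONDITION & SPEC =====
def Spec_possiblyEquals (s1 : String) (s2 : String) (out : Bool) : Prop := out = possiblyEquals_alt s1 s2
instance (s1 : String) (s2 : String) (out : Bool) : Decidable (Spec_possiblyEquals s1 s2 out) := by unfold Spec_possiblyEquals; infer_instance

-- ===== CLAIM (what is proved, stated in full; the proofs are below) =====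
def Claim_equal_possiblyEquals : Prop := ∀ (s1 : String) (s2 : String), Dom_possiblyEquals s1 s2 → Spec_possiblyEquals s1 s2 (possiblyEquals s1 s2)

-- ===== LEMMAS AND PROOFS =====
-- Common ground: the edge relation pvSuccs of the state graph, its edge lists
-- pvRun1/pvRun2 for digit runs, and the bare reachability recursion pvReach.
-- A's memoized dfs computes pvReach of its argument (pvA_main); B's forward DP
-- computes the set of states reachable FROM the start, so its answer is
-- pvReach (0,0,0) as well (pvReach_iff_RTG and the forward invariant).

def pvRun1 (c1 : List Char) (j : Nat) (d : Int) (k : Nat) (num : Int) :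
    List (Nat × Nat × Int) :=
  if k < c1.length ∧ (c1.getD k ' ').isDigit then
    let num' := num * 10 + (((c1.getD k ' ').toNat : Int) - 48)
    (k + 1, j, d - num') :: pvRun1 c1 j d (k + 1) num'
  else []
termination_by c1.length - k
decreasing_by omega

def pvRun2 (c2 : List Char) (i : Nat) (d : Int) (k : Nat) (num : Int) :
    List (Nat × Nat × Int) :=
  if k < c2.length ∧ (c2.getD k ' ').isDigit then
    let num' := num * 10 + (((c2.getD k ' ').toNat : Int) - 48)
    (i, k + 1, d + num') :: pvRun2 c2 i d (k + 1) num'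
  else []
termination_by c2.length - k
decreasing_by omega

def pvSuccs (c1 c2 : List Char) (s : Nat × Nat × Int) : List (Nat × Nat × Int) :=
  match s with
  | (i, j, d) =>
    if i < c1.length ∧ (c1.getD i ' ').isDigit then
      pvRun1 c1 j d i 0
    else if j < c2.length ∧ (c2.getD j ' ').isDigit then
      pvRun2 c2 i d j 0
    else if d = 0 then
      if i < c1.length ∧ j < c2.length ∧ c1.getD i ' ' = c2.getD j ' ' then
        [(i + 1, j + 1, d)]
      else []
    else if d < 0 then
      if j < c2.length then [(i, j + 1, d + 1)] else []
    else if 0 < d then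
      if i < c1.length then [(i + 1, j, d - 1)] else []
    else []

def pvMu (c1 c2 : List Char) (s : Nat × Nat × Int) : Nat :=
  (c1.length - s.1) + (c2.length - s.2.1)

lemma pvRun1_mem {c1 : List Char} {j : Nat} {d : Int} :
    ∀ {k : Nat} {num : Int} {x : Nat × Nat × Int},
    x ∈ pvRun1 c1 j d k num →
    ∃ k' num', x = (k' + 1, j, d - num') ∧ k ≤ k' ∧ k' < c1.length := by
  intro k num x hx
  induction k, num using pvRun1.induct (c1 := c1) with
  | case1 k num hcond nump =>
    rename_i ih
    rw [pvRun1, if_pos hcond] at hx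
    simp only [List.mem_cons] at hx
    rcases hx with h | h
    · exact ⟨k, _, by simpa using h, le_refl _, hcond.1⟩
    · obtain ⟨k', num'', hx', hk', hlt⟩ := ih h
      exact ⟨k', num'', hx', by omega, hlt⟩
  | case2 k num hcond =>
    rw [pvRun1, if_neg hcond] at hx
    simp at hx

lemma pvRun2_mem {c2 : List Char} {i : Nat} {d : Int} :
    ∀ {k : Nat} {num : Int} {x : Nat × Nat × Int},
    x ∈ pvRun2 c2 i d k num →
    ∃ k' num', x = (i, k' + 1, d + num') ∧ k ≤ k' ∧ k' < c2.length := by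
  intro k num x hx
  induction k, num using pvRun2.induct (c2 := c2) with
  | case1 k num hcond nump =>
    rename_i ih
    rw [pvRun2, if_pos hcond] at hx
    simp only [List.mem_cons] at hx
    rcases hx with h | h
    · exact ⟨k, _, by simpa using h, le_refl _, hcond.1⟩
    · obtain ⟨k', num'', hx', hk', hlt⟩ := ih h
      exact ⟨k', num'', hx', by omega, hlt⟩
  | case2 k num hcond =>
    rw [pvRun2, if_neg hcond] at hx
    simp at hx

lemma pvSuccs_mu {c1 c2 : List Char} {s t : Nat × Nat × Int}
    (ht : t ∈ pvSuccs c1 c2 s) : pvMu c1 c2 t < pvMu c1 c2 s := by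
  obtain ⟨i, j, d⟩ := s
  simp only [pvSuccs] at ht
  split_ifs at ht with h1 h2 h3 h4 h5 h6 h7 h8
  · obtain ⟨k', num', hx, hk, hlt⟩ := pvRun1_mem ht
    subst hx; simp only [pvMu]; omega
  · obtain ⟨k', num', hx, hk, hlt⟩ := pvRun2_mem ht
    subst hx; simp only [pvMu]; omega
  · simp at ht; subst ht; simp only [pvMu]; omega
  · simp at ht
  · simp at ht; subst ht; simp only [pvMu]; omega
  · simp at ht
  · simp at ht; subst ht; simp only [pvMu]; omega
  · simp at ht
  · simp at ht

def pvReach (c1 c2 : List Char) (s : Nat × Nat × Int) : Bool :=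
  if s = (c1.length, c2.length, (0 : Int)) then true
  else (pvSuccs c1 c2 s).attach.any (fun t => pvReach c1 c2 t.1)
termination_by pvMu c1 c2 s
decreasing_by exact pvSuccs_mu t.2

lemma pvReach_eq (c1 c2 : List Char) (s : Nat × Nat × Int) :
    pvReach c1 c2 s =
      (decide (s = (c1.length, c2.length, (0 : Int))) ||
        (pvSuccs c1 c2 s).any (pvReach c1 c2)) := by
  rw [pvReach]
  split_ifs with h
  · simp [h]
  · apply Bool.eq_iff_iff.mpr
    simp only [h, decide_false, Bool.false_or, List.any_eq_true, List.mem_attach,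
      true_and, Subtype.exists]
    constructor
    · rintro ⟨a, ha, hr⟩; exact ⟨a, ha, hr⟩
    · rintro ⟨a, ha, hr⟩; exact ⟨a, ha, hr⟩

-- ---------- A-side: the memoized dfs computes pvReach ----------

def pvInvC (c1 c2 : List Char) (cache : PySem.Dict (Nat × Nat × Int) Bool) : Prop :=
  ∀ k w, cache.get? k = some w → w = false ∧ pvReach c1 c2 k = false

lemma pvInvC_empty (c1 c2 : List Char) : pvInvC c1 c2 PySem.Dict.empty := by
  intro k w h
  simp [PySem.Dict.get?_empty] at h

lemma pvInvC_insert {c1 c2 : List Char} {cache : PySem.Dict (Nat × Nat × Int) Bool}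
    {key : Nat × Nat × Int} (h : pvInvC c1 c2 cache)
    (hk : pvReach c1 c2 key = false) :
    pvInvC c1 c2 (cache.insert key false) := by
  intro k w hget
  rw [PySem.Dict.get?_insert] at hget
  split_ifs at hget with he
  · cases hget; exact ⟨rfl, he ▸ hk⟩
  · exact h k w hget

lemma pvA_main : ∀ (M : Nat) (c1 c2 : List Char),
    (∀ i j d cache, 2 * ((c1.length - i) + (c2.length - j)) + 1 ≤ M →
      pvInvC c1 c2 cache →
      (pvDfsA c1 c2 i j d cache).1 = pvReach c1 c2 (i, j, d) ∧
        pvInvC c1 c2 (pvDfsA c1 c2 i j d cache).2) ∧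
    (∀ j d k num cache, 2 * ((c1.length - k) + (c2.length - j)) ≤ M →
      pvInvC c1 c2 cache →
      (pvLoopA1 c1 c2 j d k num cache).1 = (pvRun1 c1 j d k num).any (pvReach c1 c2) ∧
        pvInvC c1 c2 (pvLoopA1 c1 c2 j d k num cache).2) ∧
    (∀ i d k num cache, 2 * ((c1.length - i) + (c2.length - k)) ≤ M →
      pvInvC c1 c2 cache →
      (pvLoopA2 c1 c2 i d k num cache).1 = (pvRun2 c2 i d k num).any (pvReach c1 c2) ∧
        pvInvC c1 c2 (pvLoopA2 c1 c2 i d k num cache).2) := by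
  intro M
  induction M using Nat.strong_induction_on with
  | _ M ih =>
    intro c1 c2
    refine ⟨?_, ?_, ?_⟩
    · -- dfs
      intro i j d cache hM hInv
      rw [pvDfsA]
      by_cases hbase : i = c1.length ∧ j = c2.length
      · rw [if_pos hbase]
        refine ⟨?_, hInv⟩
        rw [pvReach_eq]
        by_cases hd : d = 0
        · subst hd
          have : ((i, j, (0:Int))) = (c1.length, c2.length, (0 : Int)) := by
            rw [hbase.1, hbase.2]
          simp [this]
        · have hne : ((i, j, d) : Nat × Nat × Int) ≠ (c1.length, c2.length, (0 : Int)) := by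
            intro he
            rw [Prod.mk.injEq, Prod.mk.injEq] at he
            exact hd he.2.2
          have hs : pvSuccs c1 c2 (i, j, d) = [] := by
            have g1 : ¬(i < c1.length ∧ (c1.getD i ' ').isDigit) := by
              rintro ⟨hh, -⟩; omega
            have g2 : ¬(j < c2.length ∧ (c2.getD j ' ').isDigit) := by
              rintro ⟨hh, -⟩; omega
            simp only [pvSuccs]
            rw [if_neg g1, if_neg g2]
            split_ifs with gg1 gg2 gg3 gg4 <;> first | rfl | omega
          simp [hne, hs, hd]
      · rw [if_neg hbase]
        have hne : ((i, j, d) : Nat × Nat × Int) ≠ (c1.length, c2.length, (0 : Int)) := by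
          intro he
          rw [Prod.mk.injEq, Prod.mk.injEq] at he
          exact hbase ⟨he.1, he.2.1⟩
        cases hget : cache.get? (i, j, d) with
        | some w =>
          obtain ⟨hw, hr⟩ := hInv _ _ hget
          exact ⟨by rw [hw, hr], hInv⟩
        | none =>
          by_cases h1 : i < c1.length ∧ (c1.getD i ' ').isDigit
          · rw [dif_pos h1]
            have hsucc : pvSuccs c1 c2 (i, j, d) = pvRun1 c1 j d i 0 := by
              simp only [pvSuccs]; rw [if_pos h1]
            obtain ⟨hl1, hl2⟩ := (ih (M - 1) (by omega) c1 c2).2.1 j d i 0 cache (by omega) hInv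
            rcases hres : pvLoopA1 c1 c2 j d i 0 cache with ⟨r, c'⟩
            rw [hres] at hl1 hl2
            dsimp only at hl1 hl2
            have hRany : pvReach c1 c2 (i, j, d) = (pvRun1 c1 j d i 0).any (pvReach c1 c2) := by
              rw [pvReach_eq, hsucc]; simp [hne]
            cases r with
            | true => exact ⟨by dsimp only; rw [hRany, ← hl1], hl2⟩
            | false =>
              have hRf : pvReach c1 c2 (i, j, d) = false := by rw [hRany, ← hl1]
              exact ⟨by dsimp only; rw [hRf], pvInvC_insert hl2 hRf⟩
          · rw [dif_neg h1]
            by_cases h2 : j < c2.length ∧ (c2.getD j ' ').isDigit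
            · rw [dif_pos h2]
              have hsucc : pvSuccs c1 c2 (i, j, d) = pvRun2 c2 i d j 0 := by
                simp only [pvSuccs]; rw [if_neg h1, if_pos h2]
              obtain ⟨hl1, hl2⟩ := (ih (M - 1) (by omega) c1 c2).2.2 i d j 0 cache (by omega) hInv
              rcases hres : pvLoopA2 c1 c2 i d j 0 cache with ⟨r, c'⟩
              rw [hres] at hl1 hl2
              dsimp only at hl1 hl2
              have hRany : pvReach c1 c2 (i, j, d) = (pvRun2 c2 i d j 0).any (pvReach c1 c2) := by
                rw [pvReach_eq, hsucc]; simp [hne]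
              cases r with
              | true => exact ⟨by dsimp only; rw [hRany, ← hl1], hl2⟩
              | false =>
                have hRf : pvReach c1 c2 (i, j, d) = false := by rw [hRany, ← hl1]
                exact ⟨by dsimp only; rw [hRf], pvInvC_insert hl2 hRf⟩
            · rw [dif_neg h2]
              by_cases hd0 : d = 0
              · rw [if_pos hd0]
                by_cases h3 : i < c1.length ∧ j < c2.length ∧ c1.getD i ' ' = c2.getD j ' '
                · rw [dif_pos h3]
                  obtain ⟨hr1, hr2⟩ := (ih (M - 1) (by omega) c1 c2).1 (i + 1) (j + 1) d cache
                    (by omega) hInv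
                  refine ⟨?_, hr2⟩
                  rw [hr1, pvReach_eq (s := (i, j, d))]
                  have hsucc : pvSuccs c1 c2 (i, j, d) = [(i + 1, j + 1, d)] := by
                    simp only [pvSuccs]; rw [if_neg h1, if_neg h2, if_pos hd0, if_pos h3]
                  rw [hsucc]
                  simp [hne]
                · rw [dif_neg h3]
                  have hRf : pvReach c1 c2 (i, j, d) = false := by
                    rw [pvReach_eq]
                    have hs : pvSuccs c1 c2 (i, j, d) = [] := by
                      simp only [pvSuccs]; rw [if_neg h1, if_neg h2, if_pos hd0, if_neg h3]
                    simp [hne, hs]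
                  exact ⟨by simp [hRf], pvInvC_insert hInv hRf⟩
              · rw [if_neg hd0]
                by_cases hdneg : d < 0
                · rw [if_pos hdneg]
                  by_cases h4 : j < c2.length
                  · rw [dif_pos h4]
                    obtain ⟨hr1, hr2⟩ := (ih (M - 1) (by omega) c1 c2).1 i (j + 1) (d + 1) cache
                      (by omega) hInv
                    refine ⟨?_, hr2⟩
                    rw [hr1, pvReach_eq (s := (i, j, d))]
                    have hsucc : pvSuccs c1 c2 (i, j, d) = [(i, j + 1, d + 1)] := by
                      simp only [pvSuccs]; rw [if_neg h1, if_neg h2, if_neg hd0, if_pos hdneg,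
                        if_pos h4]
                    rw [hsucc]
                    simp [hne]
                  · rw [dif_neg h4]
                    have hRf : pvReach c1 c2 (i, j, d) = false := by
                      rw [pvReach_eq]
                      have hs : pvSuccs c1 c2 (i, j, d) = [] := by
                        simp only [pvSuccs]; rw [if_neg h1, if_neg h2, if_neg hd0, if_pos hdneg,
                          if_neg h4]
                      simp [hne, hs]
                    exact ⟨by simp [hRf], pvInvC_insert hInv hRf⟩
                · rw [if_neg hdneg]
                  by_cases hdpos : 0 < d
                  · rw [if_pos hdpos]
                    by_cases h5 : i < c1.length
                    · rw [dif_pos h5]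
                      obtain ⟨hr1, hr2⟩ := (ih (M - 1) (by omega) c1 c2).1 (i + 1) j (d - 1) cache
                        (by omega) hInv
                      refine ⟨?_, hr2⟩
                      rw [hr1, pvReach_eq (s := (i, j, d))]
                      have hsucc : pvSuccs c1 c2 (i, j, d) = [(i + 1, j, d - 1)] := by
                        simp only [pvSuccs]; rw [if_neg h1, if_neg h2, if_neg hd0, if_neg hdneg,
                          if_pos hdpos, if_pos h5]
                      rw [hsucc]
                      simp [hne]
                    · rw [dif_neg h5]
                      have hRf : pvReach c1 c2 (i, j, d) = false := by
                        rw [pvReach_eq]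
                        have hs : pvSuccs c1 c2 (i, j, d) = [] := by
                          simp only [pvSuccs]; rw [if_neg h1, if_neg h2, if_neg hd0, if_neg hdneg,
                            if_pos hdpos, if_neg h5]
                        simp [hne, hs]
                      exact ⟨by simp [hRf], pvInvC_insert hInv hRf⟩
                  · omega
    · -- loopA1
      intro j d k num cache hM hInv
      rw [pvLoopA1, pvRun1]
      by_cases h : k < c1.length ∧ (c1.getD k ' ').isDigit
      · rw [dif_pos h, if_pos h]
        have hMk : 2 * ((c1.length - (k + 1)) + (c2.length - j)) + 1 ≤ M - 1 := by omega
        obtain ⟨hr1, hr2⟩ := (ih (M - 1) (by omega) c1 c2).1 (k + 1) j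
          (d - (num * 10 + (((c1.getD k ' ').toNat : Int) - 48))) cache hMk hInv
        rcases hres : pvDfsA c1 c2 (k + 1) j
            (d - (num * 10 + (((c1.getD k ' ').toNat : Int) - 48))) cache with ⟨r, c'⟩
        rw [hres] at hr1 hr2
        dsimp only at hr1 hr2
        have hMl : 2 * ((c1.length - (k + 1)) + (c2.length - j)) ≤ M - 1 := by omega
        obtain ⟨hl1, hl2⟩ := (ih (M - 1) (by omega) c1 c2).2.1 j d (k + 1)
          (num * 10 + (((c1.getD k ' ').toNat : Int) - 48)) c' hMl hr2
        simp only [List.getD] at hres hr1 hl1 hl2 hr2 ⊢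
        rw [hres]
        cases r with
        | true =>
          refine ⟨?_, hr2⟩
          simp only [List.any_cons]
          rw [← hr1]
          simp
        | false =>
          refine ⟨?_, hl2⟩
          simp only [List.any_cons]
          rw [← hr1, hl1]
          simp
      · rw [dif_neg h, if_neg h]
        exact ⟨by simp, hInv⟩
    · -- loopA2
      intro i d k num cache hM hInv
      rw [pvLoopA2, pvRun2]
      by_cases h : k < c2.length ∧ (c2.getD k ' ').isDigit
      · rw [dif_pos h, if_pos h]
        have hMk : 2 * ((c1.length - i) + (c2.length - (k + 1))) + 1 ≤ M - 1 := by omega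
        obtain ⟨hr1, hr2⟩ := (ih (M - 1) (by omega) c1 c2).1 i (k + 1)
          (d + (num * 10 + (((c2.getD k ' ').toNat : Int) - 48))) cache hMk hInv
        rcases hres : pvDfsA c1 c2 i (k + 1)
            (d + (num * 10 + (((c2.getD k ' ').toNat : Int) - 48))) cache with ⟨r, c'⟩
        rw [hres] at hr1 hr2
        dsimp only at hr1 hr2
        have hMl : 2 * ((c1.length - i) + (c2.length - (k + 1))) ≤ M - 1 := by omega
        obtain ⟨hl1, hl2⟩ := (ih (M - 1) (by omega) c1 c2).2.2 i d (k + 1)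
          (num * 10 + (((c2.getD k ' ').toNat : Int) - 48)) c' hMl hr2
        simp only [List.getD] at hres hr1 hl1 hl2 hr2 ⊢
        rw [hres]
        cases r with
        | true =>
          refine ⟨?_, hr2⟩
          simp only [List.any_cons]
          rw [← hr1]
          simp
        | false =>
          refine ⟨?_, hl2⟩
          simp only [List.any_cons]
          rw [← hr1, hl1]
          simp
      · rw [dif_neg h, if_neg h]
        exact ⟨by simp, hInv⟩

lemma pvA_eq (s1 s2 : String) :
    possiblyEquals s1 s2 = pvReach s1.toList s2.toList (0, 0, 0) := by
  have h := ((pvA_main (2 * ((s1.toList.length - 0) + (s2.toList.length - 0)) + 1)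
    s1.toList s2.toList).1) 0 0 0 PySem.Dict.empty (by omega) (pvInvC_empty _ _)
  exact h.1

-- ---------- B-side: the bucketed forward DP computes pvReach (0,0,0) ----------

lemma pvIsdigit_eq (c : Char) : PySem.Chars.isdigit c = c.isDigit := by
  simp [PySem.Chars.isdigit, Char.isDigit, Char.le_def]
  rfl

def pvMem (r : PySem.Dict (Nat × Nat) (PySem.Set Int)) (s : Nat × Nat × Int) : Prop :=
  s.2.2 ∈ r.getD (s.1, s.2.1) ([] : PySem.Set Int)

lemma pvPush_getD1 (st : pvSt) (c : Nat × Nat) (x : Int) (kk : Nat × Nat) :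
    (pvPush st c x).1.getD kk ([] : PySem.Set Int)
      = if kk = c then PySem.Set.add (st.1.getD c ([] : PySem.Set Int)) x
        else st.1.getD kk ([] : PySem.Set Int) := by
  unfold pvPush
  cases hg : st.1.get? c with
  | some s =>
    dsimp only
    rw [PySem.Dict.getD_insert]
    have hs : st.1.getD c ([] : PySem.Set Int) = s := by
      rw [PySem.Dict.getD_eq_get?_getD, hg]
      rfl
    rw [hs]
  | none =>
    dsimp only
    rw [PySem.Dict.getD_insert]
    have hs : st.1.getD c ([] : PySem.Set Int) = [] := by
      rw [PySem.Dict.getD_eq_get?_getD, hg]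
      rfl
    rw [hs]

lemma pvPush_mem (st : pvSt) (c : Nat × Nat) (x : Int) (s : Nat × Nat × Int) :
    pvMem (pvPush st c x).1 s ↔ pvMem st.1 s ∨ s = (c.1, c.2, x) := by
  obtain ⟨a, b⟩ := c
  obtain ⟨i, j, d⟩ := s
  unfold pvMem
  dsimp only
  rw [pvPush_getD1]
  split_ifs with h
  · rw [Prod.mk.injEq] at h
    obtain ⟨rfl, rfl⟩ := h
    simp [PySem.Set.mem_add]
  · simp [Prod.mk.injEq] at h ⊢
    tauto

lemma pvPush_bucket (st : pvSt) (c : Nat × Nat) (x : Int) (L' : Nat) (c' : Nat × Nat)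
    (h : c' ∈ st.2.getD L' ([] : List (Nat × Nat))) :
    c' ∈ (pvPush st c x).2.getD L' ([] : List (Nat × Nat)) := by
  unfold pvPush
  cases hg : st.1.get? c with
  | some s => exact h
  | none =>
    dsimp only
    rw [List.getD_eq_getElem?_getD] at h ⊢
    rw [List.getElem?_set]
    split_ifs with h1 h2
    · subst h1
      rw [List.getD_eq_getElem?_getD]
      simp only [Option.getD_some]
      cases hget : st.2[c.1 + c.2]? with
      | none => rw [hget] at h; simp at h
      | some l => rw [hget] at h; simp only [Option.getD_some] at h; exact List.mem_append_left _ h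
    · subst h1
      rw [List.getElem?_eq_none (by omega)] at h
      simp at h
    · exact h

lemma pvPush_self_bucket (st : pvSt) (c : Nat × Nat) (x : Int)
    (hg : st.1.get? c = none) (hlen : c.1 + c.2 < st.2.length) :
    c ∈ (pvPush st c x).2.getD (c.1 + c.2) ([] : List (Nat × Nat)) := by
  unfold pvPush
  rw [hg]
  dsimp only
  rw [List.getD_eq_getElem?_getD, List.getElem?_set]
  simp only [if_pos hlen, Option.getD_some, reduceIte]
  exact List.mem_append_right _ (List.mem_singleton_self c)

lemma pvPush_contains (st : pvSt) (c : Nat × Nat) (x : Int) (kk : Nat × Nat) :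
    (pvPush st c x).1.contains kk = (kk == c || st.1.contains kk) := by
  unfold pvPush
  cases hg : st.1.get? c <;>
    · dsimp only
      rw [PySem.Dict.contains_insert]

lemma pvPush_len (st : pvSt) (c : Nat × Nat) (x : Int) :
    (pvPush st c x).2.length = st.2.length := by
  unfold pvPush
  cases hg : st.1.get? c
  · dsimp only
    rw [List.length_set]
  · rfl

-- reachability from the start state
def pvR (c1 c2 : List Char) (s : Nat × Nat × Int) : Prop :=
  Relation.ReflTransGen (fun a b => b ∈ pvSuccs c1 c2 a) ((0 : Nat), (0 : Nat), (0 : Int)) s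

-- the three-part invariant of the forward search state: bucket-list length,
-- soundness of reach, and every populated cell queued under its layer
def pvInv (t1 t2 : List Char) (st : pvSt) : Prop :=
  st.2.length = t1.length + t2.length + 1 ∧
  (∀ s, pvMem st.1 s → pvR t1 t2 s) ∧
  (∀ cell : Nat × Nat, st.1.contains cell = true →
      cell.1 + cell.2 ≤ t1.length + t2.length →
      cell ∈ st.2.getD (cell.1 + cell.2) ([] : List (Nat × Nat)))

lemma pvPush_inv {t1 t2 : List Char} {st : pvSt} {c : Nat × Nat} {x : Int}
    (h : pvInv t1 t2 st) (hx : pvR t1 t2 (c.1, c.2, x)) :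
    pvInv t1 t2 (pvPush st c x) := by
  obtain ⟨hlen, hS, hB⟩ := h
  refine ⟨by rw [pvPush_len, hlen], ?_, ?_⟩
  · intro s hs
    rcases (pvPush_mem st c x s).mp hs with h | rfl
    · exact hS s h
    · exact hx
  · intro cell hc hsum
    by_cases hcc : cell = c
    · subst hcc
      cases hg : st.1.get? cell with
      | some s' =>
        have hcon : st.1.contains cell = true := by
          rw [PySem.Dict.contains_eq_isSome_get?, hg]
          rfl
        exact pvPush_bucket st cell x _ cell (hB cell hcon hsum)
      | none =>
        exact pvPush_self_bucket st cell x hg (by omega)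
    · rw [pvPush_contains] at hc
      have hc' : cell = c ∨ st.1.contains cell = true := by simpa using hc
      rcases hc' with h1 | h2
      · exact absurd h1 hcc
      · exact pvPush_bucket st c x _ cell (hB cell h2 hsum)

lemma pvDig1_mem (t1 : List Char) (j : Nat) (d : Int) :
    ∀ (k : Nat) (num : Int) (st : pvSt) (s : Nat × Nat × Int),
    pvMem (pvDig1 t1 j d k num st).1 s ↔ pvMem st.1 s ∨ s ∈ pvRun1 t1 j d k num := by
  intro k num st s
  induction k, num, st using pvDig1.induct (t1 := t1) (j := j) (d := d) with
  | case1 k num st hcond acc' ih =>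
    have hP : k < t1.length ∧ (t1.getD k ' ').isDigit := by
      simpa [pvIsdigit_eq] using hcond
    rw [pvDig1, if_pos hcond, pvRun1, if_pos hP]
    rw [ih, pvPush_mem]
    simp only [List.mem_cons]
    tauto
  | case2 k num st hcond =>
    have hP : ¬(k < t1.length ∧ (t1.getD k ' ').isDigit) := by
      intro hh
      have h2 := hh.2
      rw [List.getD_eq_getElem?_getD, List.getElem?_eq_getElem hh.1] at h2
      simp only [Option.getD_some] at h2
      simp [pvIsdigit_eq, hh.1, h2] at hcond
    rw [pvDig1, if_neg hcond, pvRun1, if_neg hP]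
    simp

lemma pvDig2_mem (t2 : List Char) (i : Nat) (d : Int) :
    ∀ (k : Nat) (num : Int) (st : pvSt) (s : Nat × Nat × Int),
    pvMem (pvDig2 t2 i d k num st).1 s ↔ pvMem st.1 s ∨ s ∈ pvRun2 t2 i d k num := by
  intro k num st s
  induction k, num, st using pvDig2.induct (t2 := t2) (i := i) (d := d) with
  | case1 k num st hcond acc' ih =>
    have hP : k < t2.length ∧ (t2.getD k ' ').isDigit := by
      simpa [pvIsdigit_eq] using hcond
    rw [pvDig2, if_pos hcond, pvRun2, if_pos hP]
    rw [ih, pvPush_mem]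
    simp only [List.mem_cons]
    tauto
  | case2 k num st hcond =>
    have hP : ¬(k < t2.length ∧ (t2.getD k ' ').isDigit) := by
      intro hh
      have h2 := hh.2
      rw [List.getD_eq_getElem?_getD, List.getElem?_eq_getElem hh.1] at h2
      simp only [Option.getD_some] at h2
      simp [pvIsdigit_eq, hh.1, h2] at hcond
    rw [pvDig2, if_neg hcond, pvRun2, if_neg hP]
    simp

lemma pvDig1_inv (t1 t2 : List Char) (j : Nat) (d : Int) :
    ∀ (k : Nat) (num : Int) (st : pvSt),
    pvInv t1 t2 st → (∀ s ∈ pvRun1 t1 j d k num, pvR t1 t2 s) →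
    pvInv t1 t2 (pvDig1 t1 j d k num st) := by
  intro k num st h hrun
  induction k, num, st using pvDig1.induct (t1 := t1) (j := j) (d := d) with
  | case1 k num st hcond acc' ih =>
    have hP : k < t1.length ∧ (t1.getD k ' ').isDigit := by
      simpa [pvIsdigit_eq] using hcond
    rw [pvRun1, if_pos hP] at hrun
    rw [pvDig1, if_pos hcond]
    refine ih ?_ ?_
    · exact pvPush_inv h (hrun _ (List.mem_cons_self ..))
    · intro s hs
      exact hrun s (List.mem_cons_of_mem _ hs)
  | case2 k num st hcond =>
    rw [pvDig1, if_neg hcond]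
    exact h

lemma pvDig2_inv (t1 t2 : List Char) (i : Nat) (d : Int) :
    ∀ (k : Nat) (num : Int) (st : pvSt),
    pvInv t1 t2 st → (∀ s ∈ pvRun2 t2 i d k num, pvR t1 t2 s) →
    pvInv t1 t2 (pvDig2 t2 i d k num st) := by
  intro k num st h hrun
  induction k, num, st using pvDig2.induct (t2 := t2) (i := i) (d := d) with
  | case1 k num st hcond acc' ih =>
    have hP : k < t2.length ∧ (t2.getD k ' ').isDigit := by
      simpa [pvIsdigit_eq] using hcond
    rw [pvRun2, if_pos hP] at hrun
    rw [pvDig2, if_pos hcond]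
    refine ih ?_ ?_
    · exact pvPush_inv h (hrun _ (List.mem_cons_self ..))
    · intro s hs
      exact hrun s (List.mem_cons_of_mem _ hs)
  | case2 k num st hcond =>
    rw [pvDig2, if_neg hcond]
    exact h

lemma pvBody_mem (t1 t2 : List Char) (i j : Nat) (st : pvSt) (d : Int)
    (s : Nat × Nat × Int) :
    pvMem (pvBody t1 t2 i j st d).1 s ↔ pvMem st.1 s ∨ s ∈ pvSuccs t1 t2 (i, j, d) := by
  unfold pvBody
  by_cases h1 : i < t1.length ∧ (t1.getD i ' ').isDigit
  · have hb : (i < t1.length && PySem.Chars.isdigit (t1.getD i ' ')) = true := by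
      rw [pvIsdigit_eq, h1.2, decide_eq_true h1.1]
      rfl
    rw [if_pos hb, pvDig1_mem]
    simp only [pvSuccs]
    rw [if_pos h1]
  · have hb : ¬((i < t1.length && PySem.Chars.isdigit (t1.getD i ' ')) = true) := by
      intro hc
      simp only [Bool.and_eq_true, decide_eq_true_eq, pvIsdigit_eq] at hc
      exact h1 hc
    rw [if_neg hb]
    by_cases h2 : j < t2.length ∧ (t2.getD j ' ').isDigit
    · have hb2 : (j < t2.length && PySem.Chars.isdigit (t2.getD j ' ')) = true := by
        rw [pvIsdigit_eq, h2.2, decide_eq_true h2.1]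
        rfl
      rw [if_pos hb2, pvDig2_mem]
      simp only [pvSuccs]
      rw [if_neg h1, if_pos h2]
    · have hb2 : ¬((j < t2.length && PySem.Chars.isdigit (t2.getD j ' ')) = true) := by
        intro hc
        simp only [Bool.and_eq_true, decide_eq_true_eq, pvIsdigit_eq] at hc
        exact h2 hc
      rw [if_neg hb2]
      simp only [pvSuccs]
      rw [if_neg h1, if_neg h2]
      by_cases hd0 : d = 0
      · subst hd0
        rw [if_pos (by simp : ((0 : Int) == 0) = true), if_pos rfl]
        by_cases h3 : i < t1.length ∧ j < t2.length ∧ t1.getD i ' ' = t2.getD j ' '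
        · have hb3 : (i < t1.length && j < t2.length && (t1.getD i ' ' == t2.getD j ' ')) = true := by
            simp only [Bool.and_eq_true, decide_eq_true_eq, beq_iff_eq]
            exact ⟨⟨h3.1, h3.2.1⟩, h3.2.2⟩
          rw [if_pos hb3, if_pos h3, pvPush_mem]
          simp
        · have hb3 : ¬((i < t1.length && j < t2.length && (t1.getD i ' ' == t2.getD j ' ')) = true) := by
            intro hc
            simp only [Bool.and_eq_true, decide_eq_true_eq, beq_iff_eq] at hc
            exact h3 ⟨hc.1.1, hc.1.2, hc.2⟩
          rw [if_neg hb3, if_neg h3]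
          simp
      · rw [if_neg (by simpa using hd0), if_neg hd0]
        by_cases hdn : d < 0
        · rw [if_pos hdn, if_pos hdn]
          by_cases h4 : j < t2.length
          · rw [if_pos h4, if_pos h4, pvPush_mem]
            simp
          · rw [if_neg h4, if_neg h4]
            simp
        · rw [if_neg hdn, if_neg hdn, if_pos (by omega : (0:Int) < d)]
          by_cases h5 : i < t1.length
          · rw [if_pos h5, if_pos h5, pvPush_mem]
            simp
          · rw [if_neg h5, if_neg h5]
            simp

lemma pvBody_inv (t1 t2 : List Char) (i j : Nat) (st : pvSt) (d : Int)
    (h : pvInv t1 t2 st) (hd : pvR t1 t2 (i, j, d)) :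
    pvInv t1 t2 (pvBody t1 t2 i j st d) := by
  have hsucc : ∀ s ∈ pvSuccs t1 t2 (i, j, d), pvR t1 t2 s := by
    intro s hs
    exact Relation.ReflTransGen.tail hd hs
  unfold pvBody
  by_cases h1 : i < t1.length ∧ (t1.getD i ' ').isDigit
  · have hb : (i < t1.length && PySem.Chars.isdigit (t1.getD i ' ')) = true := by
      rw [pvIsdigit_eq, h1.2, decide_eq_true h1.1]
      rfl
    rw [if_pos hb]
    refine pvDig1_inv t1 t2 j d i 0 st h ?_
    intro s hs
    refine hsucc s ?_
    simp only [pvSuccs]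
    rw [if_pos h1]
    exact hs
  · have hb : ¬((i < t1.length && PySem.Chars.isdigit (t1.getD i ' ')) = true) := by
      intro hc
      simp only [Bool.and_eq_true, decide_eq_true_eq, pvIsdigit_eq] at hc
      exact h1 hc
    rw [if_neg hb]
    by_cases h2 : j < t2.length ∧ (t2.getD j ' ').isDigit
    · have hb2 : (j < t2.length && PySem.Chars.isdigit (t2.getD j ' ')) = true := by
        rw [pvIsdigit_eq, h2.2, decide_eq_true h2.1]
        rfl
      rw [if_pos hb2]
      refine pvDig2_inv t1 t2 i d j 0 st h ?_
      intro s hs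
      refine hsucc s ?_
      simp only [pvSuccs]
      rw [if_neg h1, if_pos h2]
      exact hs
    · have hb2 : ¬((j < t2.length && PySem.Chars.isdigit (t2.getD j ' ')) = true) := by
        intro hc
        simp only [Bool.and_eq_true, decide_eq_true_eq, pvIsdigit_eq] at hc
        exact h2 hc
      rw [if_neg hb2]
      by_cases hd0 : d = 0
      · subst hd0
        rw [if_pos (by simp : ((0 : Int) == 0) = true)]
        by_cases h3 : i < t1.length ∧ j < t2.length ∧ t1.getD i ' ' = t2.getD j ' '
        · have hb3 : (i < t1.length && j < t2.length && (t1.getD i ' ' == t2.getD j ' ')) = true := by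
            simp only [Bool.and_eq_true, decide_eq_true_eq, beq_iff_eq]
            exact ⟨⟨h3.1, h3.2.1⟩, h3.2.2⟩
          rw [if_pos hb3]
          refine pvPush_inv h (hsucc _ ?_)
          simp only [pvSuccs]
          rw [if_neg h1, if_neg h2, if_pos trivial, if_pos h3]
          simp
        · have hb3 : ¬((i < t1.length && j < t2.length && (t1.getD i ' ' == t2.getD j ' ')) = true) := by
            intro hc
            simp only [Bool.and_eq_true, decide_eq_true_eq, beq_iff_eq] at hc
            exact h3 ⟨hc.1.1, hc.1.2, hc.2⟩
          rw [if_neg hb3]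
          exact h
      · rw [if_neg (by simpa using hd0)]
        by_cases hdn : d < 0
        · rw [if_pos hdn]
          by_cases h4 : j < t2.length
          · rw [if_pos h4]
            refine pvPush_inv h (hsucc _ ?_)
            simp only [pvSuccs]
            rw [if_neg h1, if_neg h2, if_neg hd0, if_pos hdn, if_pos h4]
            simp
          · rw [if_neg h4]
            exact h
        · rw [if_neg hdn]
          by_cases h5 : i < t1.length
          · rw [if_pos h5]
            refine pvPush_inv h (hsucc _ ?_)
            simp only [pvSuccs]
            rw [if_neg h1, if_neg h2, if_neg hd0, if_neg hdn,
              if_pos (by omega : (0:Int) < d), if_pos h5]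
            simp
          · rw [if_neg h5]
            exact h

lemma pvFoldBody_mem (t1 t2 : List Char) (i j : Nat) :
    ∀ (ds : List Int) (st : pvSt) (s : Nat × Nat × Int),
    pvMem ((ds.foldl (pvBody t1 t2 i j) st)).1 s ↔
      pvMem st.1 s ∨ ∃ d ∈ ds, s ∈ pvSuccs t1 t2 (i, j, d) := by
  intro ds
  induction ds with
  | nil => intro st s; simp
  | cons a ds ih =>
    intro st s
    rw [List.foldl_cons, ih, pvBody_mem]
    simp only [List.mem_cons]
    constructor
    · rintro ((h | h) | ⟨d, hd, hs⟩)
      · exact Or.inl h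
      · exact Or.inr ⟨a, Or.inl rfl, h⟩
      · exact Or.inr ⟨d, Or.inr hd, hs⟩
    · rintro (h | ⟨d, (rfl | hd), hs⟩)
      · exact Or.inl (Or.inl h)
      · exact Or.inl (Or.inr hs)
      · exact Or.inr ⟨d, hd, hs⟩

lemma pvFoldBody_inv (t1 t2 : List Char) (i j : Nat) :
    ∀ (ds : List Int) (st : pvSt),
    pvInv t1 t2 st → (∀ d ∈ ds, pvR t1 t2 (i, j, d)) →
    pvInv t1 t2 (ds.foldl (pvBody t1 t2 i j) st) := by
  intro ds
  induction ds with
  | nil => intro st h _; simpa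
  | cons a ds ih =>
    intro st h hds
    rw [List.foldl_cons]
    refine ih _ (pvBody_inv t1 t2 i j st a h (hds a (List.mem_cons_self ..))) ?_
    intro d hd
    exact hds d (List.mem_cons_of_mem _ hd)

lemma pvCell_mem (t1 t2 : List Char) (st : pvSt) (cell : Nat × Nat)
    (s : Nat × Nat × Int) :
    pvMem (pvCell t1 t2 st cell).1 s ↔
      pvMem st.1 s ∨
        ∃ d ∈ st.1.getD cell ([] : PySem.Set Int), s ∈ pvSuccs t1 t2 (cell.1, cell.2, d) := by
  unfold pvCell
  exact pvFoldBody_mem t1 t2 cell.1 cell.2 _ st s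

lemma pvCell_inv (t1 t2 : List Char) (st : pvSt) (cell : Nat × Nat)
    (h : pvInv t1 t2 st) : pvInv t1 t2 (pvCell t1 t2 st cell) := by
  unfold pvCell
  refine pvFoldBody_inv t1 t2 cell.1 cell.2 _ st h ?_
  intro d hd
  exact h.2.1 (cell.1, cell.2, d) hd

lemma pvReach_iff_RTG_aux (c1 c2 : List Char) :
    ∀ (N : Nat) (s : Nat × Nat × Int), pvMu c1 c2 s ≤ N →
    (pvReach c1 c2 s = true ↔
      Relation.ReflTransGen (fun a b => b ∈ pvSuccs c1 c2 a) s
        (c1.length, c2.length, (0 : Int))) := by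
  intro N
  induction N using Nat.strong_induction_on with
  | _ N ih =>
    intro s hN
    by_cases hg : s = (c1.length, c2.length, (0 : Int))
    · subst hg
      constructor
      · intro _
        exact Relation.ReflTransGen.refl
      · intro _
        rw [pvReach_eq]
        simp
    · rw [pvReach_eq]
      simp only [hg, decide_false, Bool.false_or, List.any_eq_true]
      constructor
      · rintro ⟨t, ht, hr⟩
        have hm := pvSuccs_mu ht
        exact Relation.ReflTransGen.head ht
          ((ih (pvMu c1 c2 t) (by omega) t le_rfl).mp hr)
      · intro h
        rcases Relation.ReflTransGen.cases_head h with rfl | ⟨t, ht, h'⟩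
        · exact absurd rfl hg
        · have hm := pvSuccs_mu ht
          exact ⟨t, ht, (ih (pvMu c1 c2 t) (by omega) t le_rfl).mpr h'⟩

lemma pvReach_iff_RTG (c1 c2 : List Char) (s : Nat × Nat × Int) :
    pvReach c1 c2 s = true ↔
      Relation.ReflTransGen (fun a b => b ∈ pvSuccs c1 c2 a) s
        (c1.length, c2.length, (0 : Int)) :=
  pvReach_iff_RTG_aux c1 c2 (pvMu c1 c2 s) s le_rfl

lemma pvSuccs_props {c1 c2 : List Char} {s t : Nat × Nat × Int}
    (hs1 : s.1 ≤ c1.length) (hs2 : s.2.1 ≤ c2.length) (ht : t ∈ pvSuccs c1 c2 s) :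
    t.1 ≤ c1.length ∧ t.2.1 ≤ c2.length ∧ s.1 + s.2.1 < t.1 + t.2.1 := by
  obtain ⟨i, j, d⟩ := s
  dsimp only at hs1 hs2 ⊢
  simp only [pvSuccs] at ht
  split_ifs at ht with h1 h2 h3 h4 h5 h6 h7 h8
  · obtain ⟨k', num', hx, hk, hlt⟩ := pvRun1_mem ht
    subst hx
    dsimp only
    omega
  · obtain ⟨k', num', hx, hk, hlt⟩ := pvRun2_mem ht
    subst hx
    dsimp only
    omega
  · simp at ht
    subst ht
    dsimp only
    omega
  · simp at ht
  · simp at ht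
    subst ht
    dsimp only
    omega
  · simp at ht
  · simp at ht
    subst ht
    dsimp only
    omega
  · simp at ht
  · simp at ht

lemma pvR_bounds {c1 c2 : List Char} {s : Nat × Nat × Int} (h : pvR c1 c2 s) :
    s.1 ≤ c1.length ∧ s.2.1 ≤ c2.length := by
  unfold pvR at h
  induction h with
  | refl => simp
  | tail hR hstep ih =>
    exact ⟨(pvSuccs_props ih.1 ih.2 hstep).1, (pvSuccs_props ih.1 ih.2 hstep).2.1⟩

lemma pvCell_mono {t1 t2 : List Char} {st : pvSt} {cell : Nat × Nat}
    {s : Nat × Nat × Int} (h : pvMem st.1 s) : pvMem (pvCell t1 t2 st cell).1 s :=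
  (pvCell_mem t1 t2 st cell s).mpr (Or.inl h)

lemma pvCellFold_mono (t1 t2 : List Char) :
    ∀ (cells : List (Nat × Nat)) (st : pvSt) (s : Nat × Nat × Int),
    pvMem st.1 s → pvMem ((cells.foldl (pvCell t1 t2) st)).1 s := by
  intro cells
  induction cells with
  | nil => intro st s h; simpa
  | cons a cells ih => intro st s h; exact ih _ s (pvCell_mono h)

lemma pvCellFold_inv (t1 t2 : List Char) :
    ∀ (cells : List (Nat × Nat)) (st : pvSt),
    pvInv t1 t2 st → pvInv t1 t2 (cells.foldl (pvCell t1 t2) st) := by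
  intro cells
  induction cells with
  | nil => intro st h; simpa
  | cons a cells ih => intro st h; exact ih _ (pvCell_inv t1 t2 st a h)

lemma pvCellFold_complete (t1 t2 : List Char) (pi pj : Nat) (pd : Int)
    (s : Nat × Nat × Int) (hs : s ∈ pvSuccs t1 t2 (pi, pj, pd)) :
    ∀ (cells : List (Nat × Nat)) (st : pvSt),
    (pi, pj) ∈ cells → pvMem st.1 (pi, pj, pd) →
      pvMem ((cells.foldl (pvCell t1 t2) st)).1 s := by
  intro cells
  induction cells with
  | nil => intro st h; simp at h
  | cons a cells ih =>
    intro st hmem hp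
    rw [List.foldl_cons]
    by_cases ha : a = (pi, pj)
    · subst ha
      have hstep : pvMem (pvCell t1 t2 st (pi, pj)).1 s :=
        (pvCell_mem t1 t2 st (pi, pj) s).mpr (Or.inr ⟨pd, hp, hs⟩)
      exact pvCellFold_mono t1 t2 cells _ s hstep
    · have hmem' : (pi, pj) ∈ cells := by
        rcases List.mem_cons.mp hmem with h | h
        · exact absurd h.symm ha
        · exact h
      exact ih _ hmem' (pvCell_mono hp)

def pvCompl (t1 t2 : List Char) (k : Nat) (st : pvSt) : Prop :=
  pvMem st.1 ((0 : Nat), (0 : Nat), (0 : Int)) ∧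
    ∀ p s, pvR t1 t2 p → p.1 + p.2.1 < k → s ∈ pvSuccs t1 t2 p → pvMem st.1 s

def pvF (t1 t2 : List Char) (k : Nat) : pvSt :=
  (List.range k).foldl
    (fun st L => (st.2.getD L []).foldl (pvCell t1 t2) st)
    (pvPush (PySem.Dict.empty, List.replicate (t1.length + t2.length + 1) []) (0, 0) 0)

lemma pvSt0_getD1 (t1 t2 : List Char) (kk : Nat × Nat) :
    (pvF t1 t2 0).1.getD kk ([] : PySem.Set Int)
      = if kk = ((0 : Nat), (0 : Nat)) then [(0 : Int)] else [] := by
  rw [pvF, List.range_zero, List.foldl_nil, pvPush_getD1]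
  split_ifs with h
  · rw [PySem.Dict.getD_empty]
    rfl
  · exact PySem.Dict.getD_empty ..

lemma pvSt0_bucket (t1 t2 : List Char) :
    (pvF t1 t2 0).2.getD 0 ([] : List (Nat × Nat)) = [((0 : Nat), (0 : Nat))] := by
  rw [pvF, List.range_zero, List.foldl_nil]
  unfold pvPush
  rw [PySem.Dict.get?_empty]
  dsimp only
  rw [List.replicate_succ]
  rfl

lemma pvF_inv (t1 t2 : List Char) :
    ∀ k, pvInv t1 t2 (pvF t1 t2 k) ∧ pvCompl t1 t2 k (pvF t1 t2 k) := by
  intro k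
  induction k with
  | zero =>
    have hgd := pvSt0_getD1 t1 t2
    refine ⟨⟨?_, ?_, ?_⟩, ?_, ?_⟩
    · rw [pvF, List.range_zero, List.foldl_nil, pvPush_len]
      exact List.length_replicate
    · intro s hs
      obtain ⟨i, j, d⟩ := s
      unfold pvMem at hs
      rw [hgd] at hs
      split_ifs at hs with hij
      · rw [Prod.mk.injEq] at hij
        simp only [List.mem_singleton] at hs
        obtain ⟨rfl, rfl⟩ := hij
        subst hs
        exact Relation.ReflTransGen.refl
      · simp at hs
    · intro cell hc hsum
      have hc0 : (pvF t1 t2 0).1.contains cell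
          = ((cell == ((0 : Nat), (0 : Nat))) || (PySem.Dict.empty (κ := Nat × Nat) (ν := PySem.Set Int)).contains cell) := by
        rw [pvF, List.range_zero, List.foldl_nil, pvPush_contains]
      rw [hc0, PySem.Dict.contains_empty] at hc
      simp only [Bool.or_false, beq_iff_eq] at hc
      subst hc
      have hb0 := pvSt0_bucket t1 t2
      dsimp only
      exact hb0 ▸ List.mem_singleton_self _
    · unfold pvMem
      rw [hgd]
      simp
    · intro p s _ hlt
      omega
  | succ k ihk =>
    obtain ⟨hInv, hC⟩ := ihk
    have hFeq : pvF t1 t2 (k + 1)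
        = (((pvF t1 t2 k).2.getD k []).foldl (pvCell t1 t2) (pvF t1 t2 k)) := by
      rw [pvF, pvF]
      simp only [List.range_succ, List.foldl_append, List.foldl_cons, List.foldl_nil]
    rw [hFeq]
    refine ⟨pvCellFold_inv t1 t2 _ _ hInv, ?_, ?_⟩
    · exact pvCellFold_mono t1 t2 _ _ _ hC.1
    · intro p s hp hlt hs
      obtain ⟨pi, pj, pd⟩ := p
      dsimp only at hlt
      by_cases hk : pi + pj < k
      · exact pvCellFold_mono t1 t2 _ _ s (hC.2 _ _ hp hk hs)
      · have hpk : pi + pj = k := by omega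
        have hpmem : pvMem (pvF t1 t2 k).1 (pi, pj, pd) := by
          have hp' : Relation.ReflTransGen (fun a b => b ∈ pvSuccs t1 t2 a)
              ((0 : Nat), (0 : Nat), (0 : Int)) (pi, pj, pd) := hp
          rcases Relation.ReflTransGen.cases_tail hp' with heq | ⟨q, hq, hstep⟩
          · rw [heq]
            exact hC.1
          · refine hC.2 q (pi, pj, pd) hq ?_ hstep
            have hb := pvR_bounds hq
            have hqs := pvSuccs_props hb.1 hb.2 hstep
            dsimp only at hqs
            omega
        have hcont : (pvF t1 t2 k).1.contains (pi, pj) = true := by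
          rw [PySem.Dict.contains_eq_isSome_get?]
          cases hcb : (pvF t1 t2 k).1.get? (pi, pj) with
          | some v => rfl
          | none =>
            unfold pvMem at hpmem
            rw [PySem.Dict.getD_eq_get?_getD, hcb] at hpmem
            simp at hpmem
        have hbnd := pvR_bounds hp
        dsimp only at hbnd
        have hcell := hInv.2.2 (pi, pj) hcont (by omega)
        dsimp only at hcell
        rw [hpk] at hcell
        exact pvCellFold_complete t1 t2 pi pj pd s hs _ _ hcell hpmem

lemma pvAlt_eq (s1 s2 : String) :
    possiblyEquals_alt s1 s2 = pvReach s1.toList s2.toList (0, 0, 0) := by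
  obtain ⟨hInv, hC⟩ :=
    pvF_inv s1.toList s2.toList (s1.toList.length + s2.toList.length + 1)
  apply Bool.eq_iff_iff.mpr
  show PySem.Set.contains
      ((pvF s1.toList s2.toList (s1.toList.length + s2.toList.length + 1)).1.getD
        (s1.toList.length, s2.toList.length) ([] : PySem.Set Int)) 0 = true ↔ _
  rw [PySem.Set.contains_iff, pvReach_iff_RTG]
  constructor
  · intro h
    exact hInv.2.1 (s1.toList.length, s2.toList.length, 0) h
  · intro h
    rcases Relation.ReflTransGen.cases_tail h with heq | ⟨q, hq, hstep⟩
    · rw [Prod.mk.injEq, Prod.mk.injEq] at heq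
      obtain ⟨h1, h2, -⟩ := heq
      have h0 := hC.1
      unfold pvMem at h0
      simp only [h1, h2] at h0 ⊢
      exact h0
    · have hb := pvR_bounds hq
      have hqs := pvSuccs_props hb.1 hb.2 hstep
      exact hC.2 q _ hq (by omega) hstep

-- ===== VERDICT (by name: the statement is the Claim_ definition above) =====
theorem possiblyEquals_spec : Claim_equal_possiblyEquals := by
  intro s1 s2 _
  unfold Spec_possiblyEquals
  rw [pvA_eq, pvAlt_eq]
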